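-- pv_equiv track=rewrite | github.com/cspickert/advent-of-code-2022 | day03.py | part2
-- ===== SOURCE A (Python) =====
-- def part2(data):
--     return sum(
--         sum(a & b & c)
--         for a, b, c in [
--             [set(values) for values in data[i : i + 3]]
--             for i in range(0, len(data), 3)
--         ]
--     )
-- ===== SOURCE B (Python) =====
-- def part2(data):
--     total = 0
--     for i in range(0, len(data), 3):
--         a, b, c = data[i:i + 3]
--         counts = {}
--         for line in (a, b, c):
--             for x in set(line):
--                 counts[x] = counts.get(x, 0) + 1
--         total += sum(x for x, n in counts.items() if n == 3)
--     return total
-- ===== Notes on version B (the rewrite author's own statement) =====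
-- stated objective: alternative
-- what changed: Replaces the three-way set intersection per group with a single explicit loop that builds a presence counter over the deduplicated lines and sums the elements whose count is exactly 3.
import Mathlib
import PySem

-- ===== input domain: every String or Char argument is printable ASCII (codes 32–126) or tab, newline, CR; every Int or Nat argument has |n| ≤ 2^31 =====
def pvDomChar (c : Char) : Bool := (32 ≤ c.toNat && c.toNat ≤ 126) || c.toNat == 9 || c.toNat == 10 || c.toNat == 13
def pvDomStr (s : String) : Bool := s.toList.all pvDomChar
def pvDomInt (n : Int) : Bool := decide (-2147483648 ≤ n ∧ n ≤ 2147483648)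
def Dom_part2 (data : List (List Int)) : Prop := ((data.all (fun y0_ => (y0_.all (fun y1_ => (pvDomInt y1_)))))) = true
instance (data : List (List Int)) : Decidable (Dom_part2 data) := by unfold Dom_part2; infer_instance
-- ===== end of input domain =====

-- B replaces the per-group three-way set intersection with an explicit presence-counting pass (alternative decomposition).

-- ===== PORT A =====
-- inner 'sum(a & b & c)' for one unpacked group 'a, b, c' of decoded sets
-- (a group that is not exactly three lines makes Python's unpacking raise ValueError; excluded by Pre_)
def part2Group (g : List (PySem.Set Int)) : Int :=
  match g with
  | [a, b, c] => (PySem.Set.inter (PySem.Set.inter a b) c).sum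
  | _ => 0

def part2 (data : List (List Int)) : Int :=
  ((PySem.List.pyRange 0 data.length 3).map (fun i =>
    part2Group ((PySem.List.slice data (some i) (some (i + 3))).map PySem.Set.ofList))).sum

-- ===== PORT B =====
-- one loop body of B: unpack the slice as a, b, c, count presences, sum elements with count 3
-- (a slice that is not exactly three lines makes Python's unpacking raise ValueError; excluded by Pre_)
def part2AltGroup (g : List (List Int)) : Int :=
  match g with
  | [a, b, c] =>
      let counts : PySem.Dict Int Int :=
        [a, b, c].foldl (fun d line =>
          (PySem.Set.ofList line).foldl (fun d x => d.modify x 0 (· + 1)) d) PySem.Dict.empty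
      ((counts.items.filter (fun p => p.2 == 3)).map (fun p => p.1)).sum
  | _ => 0

def part2_alt (data : List (List Int)) : Int :=
  (PySem.List.pyRange 0 data.length 3).foldl (fun total i =>
    total + part2AltGroup (PySem.List.slice data (some i) (some (i + 3)))) 0

-- ===== PRECONDITION & SPEC =====
-- Pre_ excludes exactly the inputs where both Pythons raise ValueError (the last group cannot be unpacked as a, b, c)
def Pre_part2 (data : List (List Int)) : Prop := 3 ∣ data.length
instance (data : List (List Int)) : Decidable (Pre_part2 data) := by unfold Pre_part2; infer_instance
def pvWitness_part2 : List (List Int) := [[1, 2], [2, 3], [2, 4]]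

def Spec_part2 (data : List (List Int)) (out : Int) : Prop := out = part2_alt data
instance (data : List (List Int)) (out : Int) : Decidable (Spec_part2 data out) := by unfold Spec_part2; infer_instance

-- ===== CLAIM (what is proved, stated in full; the proofs are below) =====
def Claim_equal_part2 : Prop := ∀ (data : List (List Int)), Dom_part2 data → Pre_part2 data → Spec_part2 data (part2 data)

-- ===== LEMMAS AND PROOFS =====

-- B's foldl is 0 plus the sum of the per-group contributions
lemma part2_alt_eq_sum (data : List (List Int)) :
    part2_alt data =
      ((PySem.List.pyRange 0 data.length 3).map (fun i =>
        part2AltGroup (PySem.List.slice data (some i) (some (i + 3))))).sum := by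
  simp [part2_alt, PySem.List.foldl_add]

lemma pyRange3_step (L : Nat) : PySem.List.pyRange 0 ((L : Int) + 3) 3 =
    0 :: (PySem.List.pyRange 0 (L : Int) 3).map (· + 3) := by
  rw [PySem.List.pyRange_of_pos _ _ (by norm_num), PySem.List.pyRange_of_pos _ _ (by norm_num)]
  have h1 : (if (0 : Int) < (L : Int) + 3 then (((L : Int) + 3 - 0 + 3 - 1) / 3).toNat else 0)
      = (if (0 : Int) < (L : Int) then (((L : Int) - 0 + 3 - 1) / 3).toNat else 0) + 1 := by
    split_ifs <;> omega
  rw [h1, List.range_succ_eq_map]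
  simp [List.map_map, Function.comp]
  ring_nf
  exact fun _ _ => trivial

lemma slice_shift3 {α : Type} (x y z : α) (rest : List α) (i : Int) (hi : 0 ≤ i) :
    PySem.List.slice (x :: y :: z :: rest) (some (i + 3)) (some (i + 3 + 3))
      = PySem.List.slice rest (some i) (some (i + 3)) := by
  rw [PySem.List.slice_toNat _ (by omega) (by omega), PySem.List.slice_toNat _ hi (by omega)]
  have h3 : (i + 3).toNat = i.toNat + 3 := by omega
  have h6 : (i + 3 + 3).toNat = i.toNat + 6 := by omega
  rw [h3, h6]
  have : i.toNat + 6 - (i.toNat + 3) = i.toNat + 3 - i.toNat := by omega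
  rw [this]
  rfl

-- the chunking skeleton shared by both ports: one step peels off the first group of three
lemma chunk_step {α : Type} (x y z : α) (rest : List α) (g : List α → Int) :
    ((PySem.List.pyRange 0 ((rest.length : Int) + 3) 3).map
        (fun i => g (PySem.List.slice (x :: y :: z :: rest) (some i) (some (i + 3))))).sum
    = g [x, y, z]
      + ((PySem.List.pyRange 0 (rest.length : Int) 3).map
          (fun i => g (PySem.List.slice rest (some i) (some (i + 3))))).sum := by
  have hhead : PySem.List.slice (x :: y :: z :: rest) (some 0) (some (0 + 3)) = [x, y, z] := by
    rw [PySem.List.slice_toNat _ le_rfl (by norm_num)]; rfl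
  rw [pyRange3_step]
  simp only [List.map_cons, List.map_map, List.sum_cons, hhead]
  congr 1
  apply congrArg List.sum
  apply List.map_congr_left
  intro i hi
  have h0 : 0 ≤ i := ((PySem.List.mem_pyRange_iff_of_pos (by norm_num) i).1 hi).1
  simp only [Function.comp_apply]
  rw [slice_shift3 x y z rest i h0]

-- a deduplicated line contributes each element once
lemma count_set_eq_ite (l : List Int) (x : Int) :
    List.count x (PySem.Set.ofList l) = if x ∈ l then 1 else 0 := by
  have hn := PySem.Set.nodup_ofList l
  by_cases h : x ∈ l
  · rw [if_pos h]
    exact List.count_eq_one_of_mem hn ((PySem.Set.mem_ofList l x).2 h)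
  · rw [if_neg h, List.count_eq_zero]
    exact fun hm => h ((PySem.Set.mem_ofList l x).1 hm)

-- per-group agreement: intersection sum = counter-based sum (both lists are Nodup with the same members)
lemma group_eq (a b c : List Int) :
    part2Group ([a, b, c].map PySem.Set.ofList) = part2AltGroup [a, b, c] := by
  show (PySem.Set.inter (PySem.Set.inter (PySem.Set.ofList a) (PySem.Set.ofList b)) (PySem.Set.ofList c)).sum = _
  have hcounts : ([a, b, c].foldl (fun d line =>
        (PySem.Set.ofList line).foldl (fun d x => d.modify x 0 (· + 1)) d) PySem.Dict.empty)
      = PySem.Dict.counter (PySem.Set.ofList a ++ PySem.Set.ofList b ++ PySem.Set.ofList c) := by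
    rw [PySem.Dict.counter_eq_foldl, List.foldl_append, List.foldl_append]
    rfl
  show _ = (((_ : PySem.Dict Int Int).items.filter (fun p => p.2 == 3)).map (fun p => p.1)).sum
  rw [hcounts, PySem.Dict.items_counter, List.filter_map, List.map_map]
  have hmapid : ((fun p : Int × Int => p.1) ∘
      (fun k => (k, (List.count k (PySem.Set.ofList a ++ PySem.Set.ofList b ++ PySem.Set.ofList c) : Int)))) = id := rfl
  rw [hmapid, List.map_id]
  apply List.Perm.sum_eq
  rw [List.perm_ext_iff_of_nodup
        (PySem.Set.nodup_inter _ _ (PySem.Set.nodup_inter _ _ (PySem.Set.nodup_ofList a)))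
        ((PySem.Set.nodup_ofList _).filter _)]
  intro x
  simp only [List.mem_filter, PySem.Set.mem_inter, PySem.Set.mem_ofList, List.mem_append,
    Function.comp_apply, beq_iff_eq, List.count_append, count_set_eq_ite]
  constructor
  · rintro ⟨⟨ha', hb'⟩, hc'⟩
    refine ⟨Or.inl (Or.inl ha'), ?_⟩
    rw [if_pos ha', if_pos hb', if_pos hc']
    norm_num
  · rintro ⟨hmem, h3⟩
    split_ifs at h3 with h1 h2 hc3 <;> simp_all

lemma main_eq : ∀ (data : List (List Int)), 3 ∣ data.length → part2 data = part2_alt data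
  | [], _ => rfl
  | [_], h => absurd h (by simp)
  | [_, _], h => absurd h (by simp)
  | x :: y :: z :: rest, h => by
    have h' : 3 ∣ rest.length := by
      simp only [List.length_cons] at h; omega
    have hc : (((x :: y :: z :: rest).length : Nat) : Int) = (rest.length : Int) + 3 := by
      simp only [List.length_cons]; push_cast; ring
    have hA : part2 (x :: y :: z :: rest)
        = part2Group ([x, y, z].map PySem.Set.ofList)
          + ((PySem.List.pyRange 0 (rest.length : Int) 3).map (fun i =>
              part2Group ((PySem.List.slice rest (some i) (some (i + 3))).map PySem.Set.ofList))).sum := by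
      show ((PySem.List.pyRange 0 ((x :: y :: z :: rest).length : Int) 3).map _).sum = _
      rw [hc]
      exact chunk_step x y z rest (fun l => part2Group (l.map PySem.Set.ofList))
    have hB : part2_alt (x :: y :: z :: rest)
        = part2AltGroup [x, y, z]
          + ((PySem.List.pyRange 0 (rest.length : Int) 3).map (fun i =>
              part2AltGroup (PySem.List.slice rest (some i) (some (i + 3))))).sum := by
      rw [part2_alt_eq_sum, hc]
      exact chunk_step x y z rest part2AltGroup
    rw [hA, hB, group_eq]
    congr 1
    have ih := main_eq rest h'
    rw [part2_alt_eq_sum] at ih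
    exact ih

-- ===== VERDICT (by name: the statement is the Claim_ definition above) =====
theorem part2_spec : Claim_equal_part2 := by
  intro data _ hpre
  unfold Spec_part2
  exact main_eq data hpre
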